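-- pv_equiv track=rewrite | github.com/Contributorrandom/Leetcode | first_index_string.py | LPS_non_overlapping
-- ===== SOURCE A (Python) =====
-- import math
--
-- def LPS_non_overlapping(S : str)->int:
--
--     '''
--     1. Naive:
--     '''
--
--     isEven=not(len(S)%2)
--     mid=math.ceil(len(S)/2)
--     i=0
--     while i<mid:
--         flag= S[0:mid-i]==S[mid+i:] if isEven else S[0:mid-i-1]==S[mid+i:]
--         if flag:
--             return len(S[mid+i:])
--         i+=1
--     return 0
-- ===== SOURCE B (Python) =====
-- def LPS_non_overlapping(S: str) -> int:
--     # KMP failure (prefix) function, then follow the border chain down to the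
--     # first border that fits in the first half (non-overlapping).
--     n = len(S)
--     if n == 0:
--         return 0
--     pi = [0] * n
--     k = 0
--     for i in range(1, n):
--         while k > 0 and S[i] != S[k]:
--             k = pi[k - 1]
--         if S[i] == S[k]:
--             k += 1
--         pi[i] = k
--     b = pi[n - 1]
--     while b > n // 2:
--         b = pi[b - 1]
--     return b
-- ===== Notes on version B (the rewrite author's own statement) =====
-- stated objective: faster
-- what changed: Replaces A's quadratic loop of slice comparisons by the KMP prefix-function: one linear pass builds the failure array, then the border chain from pi[n-1] is followed down to the longest border of length at most n//2.
import Mathlib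
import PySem

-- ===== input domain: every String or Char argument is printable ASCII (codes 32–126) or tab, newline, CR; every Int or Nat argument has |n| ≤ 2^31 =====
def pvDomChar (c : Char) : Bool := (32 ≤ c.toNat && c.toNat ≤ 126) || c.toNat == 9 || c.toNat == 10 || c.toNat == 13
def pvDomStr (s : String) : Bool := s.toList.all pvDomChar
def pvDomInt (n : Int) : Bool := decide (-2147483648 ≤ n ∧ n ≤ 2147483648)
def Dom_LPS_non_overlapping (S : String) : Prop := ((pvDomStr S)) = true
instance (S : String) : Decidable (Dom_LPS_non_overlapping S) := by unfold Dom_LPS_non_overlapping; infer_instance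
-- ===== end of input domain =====

-- B replaces A's quadratic slice-comparison scan by the KMP prefix function (failure
-- array) followed by a walk down the border chain; objective: faster (asymptotic).

-- ===== PORT A =====
-- the while loop: i increases while i < mid, so 'mid' iterations of fuel suffice;
-- fuel exhaustion coincides with the loop's normal exit ('return 0').
def pvALoop (l : List Char) (isEven : Bool) (mid : Int) (i : Int) : Nat → Int
  | 0 => 0
  | fuel+1 =>
    if i < mid then
      let flag : Bool :=
        if isEven then
          PySem.List.slice l (some 0) (some (mid - i)) == PySem.List.slice l (some (mid + i)) none
        else
          PySem.List.slice l (some 0) (some (mid - i - 1)) == PySem.List.slice l (some (mid + i)) none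
      if flag then ((PySem.List.slice l (some (mid + i)) none).length : Int)
      else pvALoop l isEven mid (i + 1) fuel
    else 0

def LPS_non_overlapping (S : String) : Int :=
  let l := S.toList
  let n : Int := l.length
  let isEven : Bool := PySem.Int.mod n 2 == 0          -- not(len(S)%2)
  let mid : Int := PySem.Int.floordiv (n + 1) 2        -- math.ceil(len(S)/2); exact: 0 ≤ n < 2^53
  pvALoop l isEven mid 0 mid.toNat

-- ===== PORT B =====
-- inner 'while k > 0 and S[i] != S[k]: k = pi[k-1]': k strictly decreases (pi[j] ≤ j
-- throughout), so fuel = starting k is exact; all index accesses are in range in use,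
-- so List.getD is exact there.
def pvInner (l : List Char) (pi : List Nat) (c : Char) : Nat → Nat → Nat
  | 0, k => k
  | fuel+1, k =>
    if 0 < k && !(c == l.getD k 'a') then pvInner l pi c fuel (pi.getD (k-1) 0) else k

-- one iteration of 'for i in range(1, n)'; pi[i] = k is an append since i is the next index
def pvKmpStep (l : List Char) (st : List Nat × Nat) (i : Nat) : List Nat × Nat :=
  let c := l.getD i 'a'
  let k1 := pvInner l st.1 c st.2 st.2
  let k2 := if c == l.getD k1 'a' then k1 + 1 else k1
  (st.1 ++ [k2], k2)

def pvKmp (l : List Char) : List Nat :=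
  ((List.range' 1 (l.length - 1)).foldl (pvKmpStep l) ([0], 0)).1

-- 'while b > n//2: b = pi[b-1]': b strictly decreases, so fuel = starting b is exact
def pvChainLoop (pi : List Nat) (half : Nat) : Nat → Nat → Nat
  | 0, b => b
  | fuel+1, b => if half < b then pvChainLoop pi half fuel (pi.getD (b-1) 0) else b

def LPS_non_overlapping_alt (S : String) : Int :=
  let l := S.toList
  let n := l.length
  if n == 0 then 0
  else
    let pi := pvKmp l
    let b := pi.getD (n-1) 0
    ((pvChainLoop pi (n / 2) b b : Nat) : Int)   -- n // 2 on a nonneg int is Nat division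

-- ===== PRECONDITION & SPEC =====
def Spec_LPS_non_overlapping (S : String) (out : Int) : Prop := out = LPS_non_overlapping_alt S
instance (S : String) (out : Int) : Decidable (Spec_LPS_non_overlapping S out) := by unfold Spec_LPS_non_overlapping; infer_instance

-- ===== CLAIM (what is proved, stated in full; the proofs are below) =====
def Claim_equal_LPS_non_overlapping : Prop := ∀ (S : String), Dom_LPS_non_overlapping S → Spec_LPS_non_overlapping S (LPS_non_overlapping S)

-- ===== LEMMAS AND PROOFS =====

-- 'prefix of length k is also a suffix', A-side test (via endswith)
def pvP (l : List Char) (k : Nat) : Bool := PySem.Chars.endswith l (l.take k)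

-- the common value: largest k ≤ K with pvP l k, else 0
def pvG (l : List Char) : Nat → Int
  | 0 => 0
  | k+1 => if pvP l (k+1) then ((k+1 : Nat) : Int) else pvG l k

-- Bool border test (take k = drop (len-k)), B-side notion
def pvIsB (t : List Char) (k : Nat) : Bool := t.take k == t.drop (t.length - k)

-- largest j ≤ m with pvIsB t j (always ≥ 0 since 0 is a border)
def pvMaxB (t : List Char) : Nat → Nat
  | 0 => 0
  | m+1 => if pvIsB t (m+1) then m+1 else pvMaxB t m

-- longest PROPER border of the length-i prefix of l (the prefix-function value)
def pvF (l : List Char) (i : Nat) : Nat := pvMaxB (l.take i) (i-1)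

lemma pv_flag_eq (l : List Char) (k : Nat) (hk : k ≤ l.length) :
    (l.take k == l.drop (l.length - k)) = pvP l k := by
  unfold pvP
  rw [Bool.eq_iff_iff, beq_iff_eq, PySem.Chars.endswith_iff]
  constructor
  · intro h; rw [h]; exact List.drop_suffix _ _
  · rintro ⟨s, hs⟩
    have hlt : (l.take k).length = k := by simp [hk]
    have hsl : s.length = l.length - k := by
      have := congrArg List.length hs
      simp [hlt] at this; omega
    calc l.take k = (s ++ l.take k).drop s.length := by rw [List.drop_left]
      _ = l.drop (l.length - k) := by rw [hs, hsl]

lemma pvALoop_succ (l : List Char) (isEven : Bool) (mid i : Int) (fuel : Nat) :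
    pvALoop l isEven mid i (fuel + 1) =
      if i < mid then
        (if (if isEven then
              PySem.List.slice l (some 0) (some (mid - i)) == PySem.List.slice l (some (mid + i)) none
            else
              PySem.List.slice l (some 0) (some (mid - i - 1)) == PySem.List.slice l (some (mid + i)) none)
         then ((PySem.List.slice l (some (mid + i)) none).length : Int)
         else pvALoop l isEven mid (i + 1) fuel)
      else 0 := rfl

lemma pv_even_loop (l : List Char) (K : Nat) (hn : l.length = 2 * K) :
    ∀ j : Nat, j ≤ K → pvALoop l true (K : Int) ((K : Int) - (j : Int)) j = pvG l j := by
  intro j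
  induction j with
  | zero => intro _; simp [pvALoop, pvG]
  | succ j ih =>
    intro hj
    have hi : (K : Int) - ((j + 1 : Nat) : Int) < (K : Int) := by
      push_cast; omega
    have e1 : (K : Int) - ((K : Int) - ((j + 1 : Nat) : Int)) = ((j + 1 : Nat) : Int) := by ring
    have e2 : (K : Int) + ((K : Int) - ((j + 1 : Nat) : Int)) = ((l.length - (j + 1) : Nat) : Int) := by
      rw [Nat.cast_sub (by omega)]; push_cast [hn]; ring
    have e3 : (K : Int) - ((j + 1 : Nat) : Int) + 1 = (K : Int) - (j : Int) := by push_cast; ring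
    rw [pvALoop_succ, if_pos hi, if_pos rfl, e1, e2, e3]
    simp only [PySem.List.slice_zero_start, PySem.List.slice_to_natCast,
      PySem.List.slice_from_natCast]
    rw [pv_flag_eq l (j + 1) (by omega)]
    rw [show pvG l (j + 1) = if pvP l (j + 1) then ((j + 1 : Nat) : Int) else pvG l j from rfl]
    split_ifs with h
    · simp [List.length_drop]; omega
    · exact ih (by omega)

lemma pv_odd_loop (l : List Char) (K : Nat) (hn : l.length = 2 * K + 1) :
    ∀ j : Nat, j ≤ K → pvALoop l false ((K : Int) + 1) ((K : Int) - (j : Int)) (j + 1) = pvG l j := by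
  intro j
  induction j with
  | zero =>
    intro _
    have hi : (K : Int) - ((0 : Nat) : Int) < (K : Int) + 1 := by push_cast; omega
    have e1 : (K : Int) + 1 - ((K : Int) - ((0 : Nat) : Int)) - 1 = ((0 : Nat) : Int) := by
      push_cast; ring
    have e2 : (K : Int) + 1 + ((K : Int) - ((0 : Nat) : Int)) = ((l.length : Nat) : Int) := by
      push_cast [hn]; ring
    rw [pvALoop_succ, if_pos hi, if_neg (show ¬ ((false : Bool) = true) from Bool.false_ne_true), e1, e2]
    simp only [PySem.List.slice_zero_start, PySem.List.slice_to_natCast,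
      PySem.List.slice_from_natCast]
    simp [pvG]
  | succ j ih =>
    intro hj
    have hi : (K : Int) - ((j + 1 : Nat) : Int) < (K : Int) + 1 := by push_cast; omega
    have e1 : (K : Int) + 1 - ((K : Int) - ((j + 1 : Nat) : Int)) - 1 = ((j + 1 : Nat) : Int) := by
      ring
    have e2 : (K : Int) + 1 + ((K : Int) - ((j + 1 : Nat) : Int))
        = ((l.length - (j + 1) : Nat) : Int) := by
      rw [Nat.cast_sub (by omega)]; push_cast [hn]; ring
    have e3 : (K : Int) - ((j + 1 : Nat) : Int) + 1 = (K : Int) - (j : Int) := by push_cast; ring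
    rw [pvALoop_succ, if_pos hi, if_neg (show ¬ ((false : Bool) = true) from Bool.false_ne_true), e1, e2, e3]
    simp only [PySem.List.slice_zero_start, PySem.List.slice_to_natCast,
      PySem.List.slice_from_natCast]
    rw [pv_flag_eq l (j + 1) (by omega)]
    rw [show pvG l (j + 1) = if pvP l (j + 1) then ((j + 1 : Nat) : Int) else pvG l j from rfl]
    split_ifs with h
    · simp [List.length_drop]; omega
    · exact ih (by omega)

-- ---------- generic getD bridges ----------

lemma pv_getD_eq {α : Type} (t : List α) (d : α) (m : Nat) (h : m < t.length) :
    t.getD m d = t[m] := by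
  simp [List.getD_eq_getElem?_getD, List.getElem?_eq_getElem h]

lemma pv_getD_take (t : List Char) (k m : Nat) (hm : m < k) (hk : k ≤ t.length) :
    (t.take k).getD m 'a' = t.getD m 'a' := by
  rw [pv_getD_eq _ _ m (by simp; omega), pv_getD_eq _ _ m (by omega)]
  simp [List.getElem_take]

lemma pv_getD_append {α : Type} (t : List α) (c d : α) (m : Nat) (h : m < t.length) :
    (t ++ [c]).getD m d = t.getD m d := by
  rw [pv_getD_eq _ _ m (by simp; omega), pv_getD_eq _ _ m h]
  simp [List.getElem_append_left h]

lemma pv_getD_append_last {α : Type} (t : List α) (c d : α) :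
    (t ++ [c]).getD t.length d = c := by
  rw [pv_getD_eq _ _ _ (by simp)]
  simp

-- ---------- border basics ----------

lemma pv_isB_zero (t : List Char) : pvIsB t 0 = true := by
  simp [pvIsB]

lemma pv_isB_iff (t : List Char) (k : Nat) (hk : k ≤ t.length) :
    pvIsB t k = true ↔ ∀ m, m < k → t.getD m 'a' = t.getD (t.length - k + m) 'a' := by
  unfold pvIsB
  rw [beq_iff_eq]
  constructor
  · intro h m hm
    have h1 : m < (t.take k).length := by simp; omega
    have h2 := List.getElem_of_eq h h1
    rw [pv_getD_eq t 'a' m (by omega), pv_getD_eq t 'a' _ (by omega)]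
    simpa [List.getElem_take, List.getElem_drop] using h2
  · intro h
    apply List.ext_getElem (by simp; omega)
    intro m h1 h2
    have hm : m < k := by simp at h1; omega
    have := h m hm
    rw [pv_getD_eq t 'a' m (by omega), pv_getD_eq t 'a' _ (by omega)] at this
    simpa [List.getElem_take, List.getElem_drop] using this

-- a border of a border is a border
lemma pv_border_trans (t : List Char) (j k : Nat) (hjk : j ≤ k) (hk : k ≤ t.length)
    (h1 : pvIsB t k = true) (h2 : pvIsB (t.take k) j = true) : pvIsB t j = true := by
  have hkt : (t.take k).length = k := by simp; omega
  rw [pv_isB_iff t k hk] at h1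
  rw [pv_isB_iff _ j (by omega)] at h2
  rw [pv_isB_iff t j (by omega)]
  intro m hm
  have e2 := h2 m hm
  rw [hkt] at e2
  rw [pv_getD_take t k m (by omega) hk, pv_getD_take t k _ (by omega) hk] at e2
  have e1 := h1 (k - j + m) (by omega)
  have : t.length - k + (k - j + m) = t.length - j + m := by omega
  rw [this] at e1
  rw [e2, e1]

-- a smaller border of t is a border of the bigger border prefix
lemma pv_border_restrict (t : List Char) (j k : Nat) (hjk : j ≤ k) (hk : k ≤ t.length)
    (h1 : pvIsB t k = true) (h2 : pvIsB t j = true) : pvIsB (t.take k) j = true := by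
  have hkt : (t.take k).length = k := by simp; omega
  rw [pv_isB_iff t k hk] at h1
  rw [pv_isB_iff t j (by omega)] at h2
  rw [pv_isB_iff _ j (by omega)]
  rw [hkt]
  intro m hm
  rw [pv_getD_take t k m (by omega) hk, pv_getD_take t k _ (by omega) hk]
  have e1 := h1 (k - j + m) (by omega)
  have : t.length - k + (k - j + m) = t.length - j + m := by omega
  rw [this] at e1
  rw [e1]
  exact h2 m hm

-- extending by one character: nonzero borders of t ++ [c]
lemma pv_border_snoc (t : List Char) (c : Char) (j : Nat) (hj : j < t.length) :
    (pvIsB (t ++ [c]) (j+1) = true) ↔ (pvIsB t j = true ∧ t.getD j 'a' = c) := by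
  have hL : (t ++ [c]).length = t.length + 1 := by simp
  rw [pv_isB_iff _ (j+1) (by omega), pv_isB_iff t j (by omega), hL]
  constructor
  · intro h
    constructor
    · intro m hm
      have e := h m (by omega)
      rw [pv_getD_append t c 'a' m (by omega),
        show t.length + 1 - (j+1) + m = t.length - j + m by omega,
        pv_getD_append t c 'a' _ (by omega)] at e
      exact e
    · have e := h j (by omega)
      rw [pv_getD_append t c 'a' j (by omega),
        show t.length + 1 - (j+1) + j = t.length by omega,
        pv_getD_append_last t c 'a'] at e
      exact e
  · rintro ⟨h1, h2⟩ m hm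
    rcases Nat.lt_or_ge m j with hmj | hmj
    · rw [pv_getD_append t c 'a' m (by omega),
        show t.length + 1 - (j+1) + m = t.length - j + m by omega,
        pv_getD_append t c 'a' _ (by omega)]
      exact h1 m hmj
    · have hmj' : m = j := by omega
      subst hmj'
      rw [pv_getD_append t c 'a' m (by omega),
        show t.length + 1 - (m+1) + m = t.length by omega,
        pv_getD_append_last t c 'a']
      exact h2

-- ---------- pvMaxB basics ----------

lemma pv_maxB_le (t : List Char) (m : Nat) : pvMaxB t m ≤ m := by
  induction m with
  | zero => simp [pvMaxB]
  | succ m ih => simp only [pvMaxB]; split_ifs <;> omega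

lemma pv_maxB_isB (t : List Char) (m : Nat) : pvIsB t (pvMaxB t m) = true := by
  induction m with
  | zero => simpa [pvMaxB] using pv_isB_zero t
  | succ m ih =>
    simp only [pvMaxB]
    split_ifs with h
    · exact h
    · exact ih

lemma pv_maxB_ge (t : List Char) (m j : Nat) (hj : j ≤ m) (h : pvIsB t j = true) :
    j ≤ pvMaxB t m := by
  induction m with
  | zero => omega
  | succ m ih =>
    simp only [pvMaxB]
    split_ifs with hc
    · omega
    · rcases Nat.lt_or_ge j (m+1) with hj' | hj'
      · exact ih (by omega)
      · exfalso; have : j = m + 1 := by omega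
        rw [this] at h; rw [h] at hc; exact hc rfl

-- ---------- the border chain step ----------

lemma pv_chain_step (l : List Char) (i k : Nat) (hi : i ≤ l.length) (hk0 : 0 < k)
    (hki : k < i) (h1 : pvIsB (l.take i) k = true) :
    pvIsB (l.take i) (pvF l k) = true ∧ pvF l k < k ∧
      ∀ j, j < k → pvIsB (l.take i) j = true → j ≤ pvF l k := by
  have htk : (l.take i).take k = l.take k := by
    rw [List.take_take]; congr 1; omega
  have hlen : (l.take i).length = i := by simp; omega
  have hF_le : pvF l k ≤ k - 1 := pv_maxB_le _ _
  refine ⟨?_, by omega, ?_⟩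
  · apply pv_border_trans (l.take i) (pvF l k) k (by omega) (by omega) h1
    rw [htk]; exact pv_maxB_isB (l.take k) (k-1)
  · intro j hj hjb
    have h := pv_border_restrict (l.take i) j k (by omega) (by omega) h1 hjb
    rw [htk] at h
    exact pv_maxB_ge _ _ _ (by omega) h

-- ---------- inner while loop ----------

lemma pv_inner_spec (l : List Char) (pi : List Nat) (c : Char) (i : Nat)
    (hi : i ≤ l.length)
    (hpi : ∀ j, j < i → pi.getD j 0 = pvF l (j+1)) :
    ∀ fuel k, k ≤ fuel → k < i → pvIsB (l.take i) k = true →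
      pvIsB (l.take i) (pvInner l pi c fuel k) = true ∧
      pvInner l pi c fuel k ≤ k ∧
      (pvInner l pi c fuel k = 0 ∨ l.getD (pvInner l pi c fuel k) 'a' = c) ∧
      ∀ j, j ≤ k → pvIsB (l.take i) j = true → l.getD j 'a' = c → j ≤ pvInner l pi c fuel k := by
  intro fuel
  induction fuel with
  | zero =>
    intro k hk hki hb
    have : k = 0 := by omega
    subst this
    refine ⟨hb, le_refl _, Or.inl rfl, ?_⟩
    intro j hj _ _; omega
  | succ fuel ih =>
    intro k hk hki hb
    by_cases hcond : (0 < k && !(c == l.getD k 'a')) = true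
    · have hk0 : 0 < k := by
        rcases Bool.and_eq_true_iff.mp hcond with ⟨h, _⟩; simpa using h
      have hne : c ≠ l.getD k 'a' := by
        rcases Bool.and_eq_true_iff.mp hcond with ⟨_, h⟩; simpa using h
      have step := pv_chain_step l i k hi hk0 hki hb
      have hgd : pi.getD (k-1) 0 = pvF l k := by
        have := hpi (k-1) (by omega)
        rwa [show k - 1 + 1 = k by omega] at this
      have heq : pvInner l pi c (fuel+1) k = pvInner l pi c fuel (pi.getD (k-1) 0) := by
        simp only [pvInner, hcond, if_true]
      rw [heq, hgd]
      have := ih (pvF l k) (by omega) (by omega) step.1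
      refine ⟨this.1, by omega, this.2.2.1, ?_⟩
      intro j hj hjb hjc
      rcases Nat.lt_or_ge j k with hjk | hjk
      · exact this.2.2.2 j (step.2.2 j hjk hjb) hjb hjc
      · exfalso
        have : j = k := by omega
        rw [this] at hjc
        exact hne hjc.symm
    · have heq : pvInner l pi c (fuel+1) k = k := by
        simp only [pvInner, hcond]
        simp
      rw [heq]
      refine ⟨hb, le_refl _, ?_, ?_⟩
      · rcases Nat.eq_zero_or_pos k with h0 | h0
        · exact Or.inl h0
        · right
          by_contra hne
          apply hcond
          simp only [Bool.and_eq_true, decide_eq_true_eq, Bool.not_eq_true']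
          constructor
          · simpa using h0
          · simpa using fun h => hne h.symm
      · intro j hj _ _; exact hj

-- ---------- the outer for loop: prefix-function invariant ----------

lemma pv_take_succ_eq (l : List Char) (i : Nat) (hi : i < l.length) :
    l.take (i+1) = l.take i ++ [l.getD i 'a'] := by
  rw [pv_getD_eq l 'a' i hi, List.take_add_one, List.getElem?_eq_getElem hi]
  rfl

lemma pv_kmp_inv (l : List Char) : ∀ m, m + 1 ≤ l.length →
    ((List.range' 1 m).foldl (pvKmpStep l) ([0], 0)).1.length = m + 1 ∧
    (∀ j, j < m + 1 →
      ((List.range' 1 m).foldl (pvKmpStep l) ([0], 0)).1.getD j 0 = pvF l (j+1)) ∧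
    ((List.range' 1 m).foldl (pvKmpStep l) ([0], 0)).2 = pvF l (m+1) := by
  intro m
  induction m with
  | zero =>
    intro _
    refine ⟨rfl, ?_, ?_⟩
    · intro j hj
      have : j = 0 := by omega
      subst this
      simp [pvF, pvMaxB]
    · simp [pvF, pvMaxB]
  | succ m ih =>
    intro hm
    obtain ⟨ihlen, ihpi, ihk⟩ := ih (by omega)
    set st := (List.range' 1 m).foldl (pvKmpStep l) ([0], 0) with hst
    have hconcat : List.range' 1 (m+1) = List.range' 1 m ++ [1 + m] := by
      rw [List.range'_1_concat]
    have hfold : (List.range' 1 (m+1)).foldl (pvKmpStep l) ([0], 0)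
        = pvKmpStep l st (1 + m) := by
      rw [hconcat, List.foldl_append]; rfl
    set i := m + 1 with hidef
    have hi1m : 1 + m = i := by omega
    have hilt : i < l.length := by omega
    have hile : i ≤ l.length := by omega
    -- the state's k is the longest proper border of the length-i prefix
    have hklt : st.2 < i := by
      rw [ihk]; have := pv_maxB_le (l.take i) (i-1); unfold pvF at *; omega
    have hkb : pvIsB (l.take i) st.2 = true := by
      rw [ihk]; exact pv_maxB_isB (l.take i) (i-1)
    set c := l.getD i 'a' with hc
    have hpi' : ∀ j, j < i → st.1.getD j 0 = pvF l (j+1) := fun j hj => ihpi j (by omega)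
    have inner := pv_inner_spec l st.1 c i hile hpi' st.2 st.2 (le_refl _) hklt hkb
    set k1 := pvInner l st.1 c st.2 st.2 with hk1
    have hk1lt : k1 < i := by omega
    have htake : l.take (i+1) = l.take i ++ [c] := pv_take_succ_eq l i hilt
    have htlen : (l.take i).length = i := by simp; omega
    -- every proper border of the length-i prefix is ≤ st.2
    have hmaxprop : ∀ j, j < i → pvIsB (l.take i) j = true → j ≤ st.2 := by
      intro j hj hjb
      rw [ihk]; exact pv_maxB_ge _ _ _ (by omega) hjb
    -- k2 equals the prefix-function value at i+1
    have key : (if c == l.getD k1 'a' then k1 + 1 else k1) = pvF l (i+1) := by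
      have hFdef : pvF l (i+1) = pvMaxB (l.take (i+1)) i := by
        unfold pvF; congr 1
      by_cases hc1 : c == l.getD k1 'a'
      · have hceq : l.getD k1 'a' = c := (beq_iff_eq.mp hc1).symm
        rw [if_pos hc1, hFdef]
        -- lower bound: k1+1 is a border of take (i+1)
        have hb1 : pvIsB (l.take (i+1)) (k1+1) = true := by
          rw [htake]
          rw [pv_border_snoc (l.take i) c k1 (by omega)]
          refine ⟨inner.1, ?_⟩
          rw [pv_getD_take l i k1 (by omega) hile]
          exact hceq
        have hge : k1 + 1 ≤ pvMaxB (l.take (i+1)) i := pv_maxB_ge _ _ _ (by omega) hb1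
        -- upper bound
        have hle : pvMaxB (l.take (i+1)) i ≤ k1 + 1 := by
          have hj'b : pvIsB (l.take (i+1)) (pvMaxB (l.take (i+1)) i) = true := pv_maxB_isB _ _
          have hj'le : pvMaxB (l.take (i+1)) i ≤ i := pv_maxB_le _ _
          rcases Nat.eq_zero_or_pos (pvMaxB (l.take (i+1)) i) with h0 | h0
          · omega
          · obtain ⟨j, hj⟩ : ∃ j, pvMaxB (l.take (i+1)) i = j + 1 :=
              ⟨pvMaxB (l.take (i+1)) i - 1, by omega⟩
            rw [hj] at hj'b hj'le ⊢
            rw [htake, pv_border_snoc (l.take i) c j (by omega)] at hj'b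
            have hjle : j ≤ st.2 := hmaxprop j (by omega) hj'b.1
            have hjc : l.getD j 'a' = c := by
              have := hj'b.2
              rwa [pv_getD_take l i j (by omega) hile] at this
            have := inner.2.2.2 j hjle hj'b.1 hjc
            omega
        omega
      · rw [if_neg hc1, hFdef]
        have hk10 : k1 = 0 := by
          rcases inner.2.2.1 with h0 | hceq
          · exact h0
          · exact absurd (beq_iff_eq.mpr hceq.symm) hc1
        -- no nonzero border of take (i+1) exists
        have : pvMaxB (l.take (i+1)) i = 0 := by
          have hj'b : pvIsB (l.take (i+1)) (pvMaxB (l.take (i+1)) i) = true := pv_maxB_isB _ _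
          have hj'le : pvMaxB (l.take (i+1)) i ≤ i := pv_maxB_le _ _
          rcases Nat.eq_zero_or_pos (pvMaxB (l.take (i+1)) i) with h0 | h0
          · exact h0
          · exfalso
            obtain ⟨j, hj⟩ : ∃ j, pvMaxB (l.take (i+1)) i = j + 1 :=
              ⟨pvMaxB (l.take (i+1)) i - 1, by omega⟩
            rw [hj] at hj'b hj'le
            rw [htake, pv_border_snoc (l.take i) c j (by omega)] at hj'b
            have hjle : j ≤ st.2 := hmaxprop j (by omega) hj'b.1
            have hjc : l.getD j 'a' = c := by
              have := hj'b.2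
              rwa [pv_getD_take l i j (by omega) hile] at this
            have := inner.2.2.2 j hjle hj'b.1 hjc
            rw [hk10] at this
            have hj0 : j = 0 := by omega
            rw [hj0] at hjc
            rw [hk10] at hc1
            exact hc1 (beq_iff_eq.mpr hjc.symm)
        omega
    have hstep : pvKmpStep l st (1 + m) = (st.1 ++ [pvF l (i+1)], pvF l (i+1)) := by
      simp only [pvKmpStep]
      rw [hi1m, ← hc, ← hk1, key]
    rw [hfold, hstep]
    refine ⟨?_, ?_, rfl⟩
    · simp [ihlen]
    · intro j hj
      rcases Nat.lt_or_ge j (m+1) with hjm | hjm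
      · rw [pv_getD_append st.1 _ 0 j (by omega)]
        exact ihpi j hjm
      · have hj' : j = m + 1 := by omega
        subst hj'
        have hlen' : st.1.length = m + 1 := by omega
        rw [← hlen', pv_getD_append_last, hlen']

-- ---------- the final chain loop ----------

lemma pv_chain_loop_spec (l : List Char) (pi : List Nat) (half : Nat)
    (hpi : ∀ j, j < l.length → pi.getD j 0 = pvF l (j+1)) :
    ∀ fuel b, b ≤ fuel → b < l.length → pvIsB l b = true →
      pvIsB l (pvChainLoop pi half fuel b) = true ∧
      pvChainLoop pi half fuel b ≤ half ∧
      ∀ j, j ≤ b → j ≤ half → pvIsB l j = true → j ≤ pvChainLoop pi half fuel b := by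
  intro fuel
  induction fuel with
  | zero =>
    intro b hb hbl hborder
    have hb0 : b = 0 := by omega
    subst hb0
    refine ⟨hborder, ?_, ?_⟩
    · show (0:Nat) ≤ half; omega
    · intro j hj _ _; show j ≤ (0:Nat); omega
  | succ fuel ih =>
    intro b hb hbl hborder
    by_cases hcond : half < b
    · have hb0 : 0 < b := by omega
      have hgd : pi.getD (b-1) 0 = pvF l b := by
        have := hpi (b-1) (by omega)
        rwa [show b - 1 + 1 = b by omega] at this
      have htl : l.take l.length = l := List.take_length
      have step := pv_chain_step l l.length b (le_refl _) hb0 hbl (by rwa [htl])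
      rw [htl] at step
      have heq : pvChainLoop pi half (fuel+1) b = pvChainLoop pi half fuel (pi.getD (b-1) 0) := by
        simp only [pvChainLoop, if_pos hcond]
      rw [heq, hgd]
      have := ih (pvF l b) (by omega) (by omega) step.1
      refine ⟨this.1, this.2.1, ?_⟩
      intro j hj hjh hjb
      exact this.2.2 j (step.2.2 j (by omega) hjb) hjh hjb
    · have heq : pvChainLoop pi half (fuel+1) b = b := by
        simp only [pvChainLoop, if_neg hcond]
      rw [heq]
      exact ⟨hborder, by omega, fun j hj _ _ => hj⟩

-- ---------- connecting pvG (A-side) with pvMaxB (B-side) ----------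

lemma pv_isB_eq_pvP (l : List Char) (k : Nat) (hk : k ≤ l.length) :
    pvIsB l k = pvP l k := pv_flag_eq l k hk

lemma pv_pvG_eq_maxB (l : List Char) (K : Nat) (hK : K ≤ l.length) :
    pvG l K = ((pvMaxB l K : Nat) : Int) := by
  induction K with
  | zero => simp [pvG, pvMaxB]
  | succ K ih =>
    show (if pvP l (K+1) then ((K+1 : Nat) : Int) else pvG l K) = _
    rw [show pvMaxB l (K+1) = if pvIsB l (K+1) then K+1 else pvMaxB l K from rfl]
    rw [pv_isB_eq_pvP l (K+1) hK]
    split_ifs with h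
    · rfl
    · exact ih (by omega)

-- ---------- B computes pvG l (n/2) ----------

lemma pv_alt_eq (S : String) :
    LPS_non_overlapping_alt S = pvG S.toList (S.toList.length / 2) := by
  unfold LPS_non_overlapping_alt
  set l := S.toList with hl
  set n := l.length with hn
  by_cases h0 : n = 0
  · rw [if_pos (beq_iff_eq.mpr h0)]
    rw [show n / 2 = 0 by omega]
    rfl
  · have hn1 : 1 ≤ n := by omega
    rw [if_neg (fun h => h0 (beq_iff_eq.mp h))]
    obtain ⟨hlen, hpi, _⟩ := pv_kmp_inv l (n-1) (by omega)
    have hpiK : ∀ j, j < n → (pvKmp l).getD j 0 = pvF l (j+1) := by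
      intro j hj
      unfold pvKmp
      exact hpi j (by omega)
    have hb : (pvKmp l).getD (n-1) 0 = pvF l n := by
      have := hpiK (n-1) (by omega)
      rwa [show n - 1 + 1 = n by omega] at this
    have htl : l.take n = l := List.take_length
    have hFeq : pvF l n = pvMaxB l (n-1) := by
      unfold pvF; rw [htl]
    have hFborder : pvIsB l (pvF l n) = true := by
      rw [hFeq]
      have h := pv_maxB_isB (l.take n) (n-1)
      rwa [htl] at h
    have hFlt : pvF l n < n := by
      rw [hFeq]
      have := pv_maxB_le l (n-1)
      omega
    have chain := pv_chain_loop_spec l (pvKmp l) (n/2) hpiK (pvF l n) (pvF l n)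
      (le_refl _) hFlt hFborder
    have hmain : pvChainLoop (pvKmp l) (n/2) (pvF l n) (pvF l n) = pvMaxB l (n/2) := by
      apply Nat.le_antisymm
      · exact pv_maxB_ge l (n/2) _ chain.2.1 chain.1
      · have hjb : pvIsB l (pvMaxB l (n/2)) = true := pv_maxB_isB _ _
        have hjle : pvMaxB l (n/2) ≤ n/2 := pv_maxB_le _ _
        have hjF : pvMaxB l (n/2) ≤ pvF l n := by
          rw [hFeq]
          exact pv_maxB_ge l (n-1) _ (by omega) hjb
        exact chain.2.2 _ hjF hjle hjb
    show ((pvChainLoop (pvKmp l) (l.length/2) ((pvKmp l).getD (l.length-1) 0)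
        ((pvKmp l).getD (l.length-1) 0) : Nat) : Int) = pvG l (n/2)
    rw [← hn, hb, hmain, pv_pvG_eq_maxB l (n/2) (by omega)]

-- ===== VERDICT (by name: the statement is the Claim_ definition above) =====
theorem LPS_non_overlapping_spec : Claim_equal_LPS_non_overlapping := by
  intro S _
  unfold Spec_LPS_non_overlapping
  rw [pv_alt_eq S]
  simp only [LPS_non_overlapping]
  generalize S.toList = l
  have hfd1 : PySem.Int.floordiv ((l.length : Int) + 1) 2 = (((l.length + 1) / 2 : Nat) : Int) := by
    have h : ((l.length : Int) + 1) = ((l.length + 1 : Nat) : Int) := by push_cast; ring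
    rw [h]; exact_mod_cast PySem.Int.floordiv_natCast (l.length + 1) 2
  have hmod : PySem.Int.mod ((l.length : Int)) 2 = ((l.length % 2 : Nat) : Int) := by
    exact_mod_cast PySem.Int.mod_natCast l.length 2
  rw [hfd1, hmod]
  rcases Nat.even_or_odd l.length with ⟨K, hK⟩ | ⟨K, hK⟩
  · -- even length
    have h2 : l.length = 2 * K := by omega
    have hmid : ((l.length + 1) / 2 : Nat) = K := by omega
    have hK2 : l.length / 2 = K := by omega
    have hb : (((l.length % 2 : Nat) : Int) == 0) = true := by
      have : l.length % 2 = 0 := by omega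
      simp [this]
    rw [hmid, hK2, hb, Int.toNat_natCast]
    have := pv_even_loop l K h2 K (le_refl K)
    simpa using this
  · -- odd length
    have h2 : l.length = 2 * K + 1 := by omega
    have hmid : ((l.length + 1) / 2 : Nat) = K + 1 := by omega
    have hK2 : l.length / 2 = K := by omega
    have hb : (((l.length % 2 : Nat) : Int) == 0) = false := by
      have : l.length % 2 = 1 := by omega
      simp [this]
    rw [hmid, hK2, hb, Int.toNat_natCast]
    have := pv_odd_loop l K h2 K (le_refl K)
    have hc : ((K + 1 : Nat) : Int) = (K : Int) + 1 := by push_cast; ring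
    rw [hc]
    simpa using this
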